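-- pv_equiv track=rewrite | github.com/rokkystudio/MusicBox | midi2code/midi2code.py | split_dur16_pretty
-- ===== SOURCE A (Python) =====
-- from typing import Dict, List, Tuple, Set
--
-- _PREFERRED_DUR16 = [16, 12, 8, 6, 4, 3, 2, 1]
--
-- def split_dur16_pretty(dur16: int) -> List[int]:
-- 	remaining = int(dur16)
-- 	if remaining <= 0:
-- 		return []
--
-- 	out: List[int] = []
-- 	while remaining > 0:
-- 		for p in _PREFERRED_DUR16:
-- 			if p <= remaining:
-- 				out.append(p)
-- 				remaining -= p
-- 				break
-- 		else:
-- 			out.append(1)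
-- 			remaining -= 1
-- 	return out
-- ===== SOURCE B (Python) =====
-- # Closed form: n//16 copies of 16 plus a fixed tail table for the remainder 0..15.
-- _TAIL = [[], [1], [2], [3], [4], [4, 1], [6], [6, 1],
--          [8], [8, 1], [8, 2], [8, 3], [12], [12, 1], [12, 2], [12, 3]]
--
-- def split_dur16_pretty(dur16: int):
--     n = int(dur16)
--     if n <= 0:
--         return []
--     return [16] * (n // 16) + _TAIL[n % 16]
-- ===== Notes on version B (the rewrite author's own statement) =====
-- stated objective: simpler
-- what changed: Replaced the iterative greedy while/for loop by a closed form: n//16 copies of 16 plus a constant 16-entry tail table indexed by n%16.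
import Mathlib
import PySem

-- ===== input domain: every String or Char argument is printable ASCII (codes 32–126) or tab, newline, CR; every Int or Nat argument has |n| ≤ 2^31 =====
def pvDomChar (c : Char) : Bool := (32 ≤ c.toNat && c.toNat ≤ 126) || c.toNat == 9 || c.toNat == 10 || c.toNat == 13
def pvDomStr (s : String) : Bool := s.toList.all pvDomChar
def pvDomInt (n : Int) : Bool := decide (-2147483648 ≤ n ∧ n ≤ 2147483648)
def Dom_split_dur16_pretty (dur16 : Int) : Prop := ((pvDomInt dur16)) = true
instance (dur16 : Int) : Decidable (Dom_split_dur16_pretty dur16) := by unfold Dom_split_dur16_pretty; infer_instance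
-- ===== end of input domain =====

-- B replaces A's iterative greedy loop by integer division plus a constant 16-entry tail table (objective: simpler).

-- ===== PORT A =====
def pvPreferredDur16 : List Int := [16, 12, 8, 6, 4, 3, 2, 1]

-- the 'while remaining > 0' loop; the for/else picks the first preferred value ≤ remaining
def pvLoopA (remaining : Int) (out : List Int) : List Int :=
  if _h : remaining > 0 then
    match hf : pvPreferredDur16.find? (fun p => decide (p ≤ remaining)) with
    | some p => pvLoopA (remaining - p) (out ++ [p])
    | none => pvLoopA (remaining - 1) (out ++ [1])
  else out
termination_by remaining.toNat
decreasing_by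
  · have hm := List.mem_of_find?_eq_some hf
    have hp : 1 ≤ p := by fin_cases hm <;> norm_num
    omega
  · omega

def split_dur16_pretty (dur16 : Int) : List Int :=
  let remaining := dur16
  if remaining ≤ 0 then [] else pvLoopA remaining []

-- ===== PORT B =====
def pvTail : List (List Int) :=
  [[], [1], [2], [3], [4], [4, 1], [6], [6, 1],
   [8], [8, 1], [8, 2], [8, 3], [12], [12, 1], [12, 2], [12, 3]]

-- _TAIL[n % 16] is always in range (0 ≤ n % 16 < 16), so the pyGet? lookup is exact; getD [] is never taken
def split_dur16_pretty_alt (dur16 : Int) : List Int :=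
  let n := dur16
  if n ≤ 0 then []
  else List.replicate (PySem.Int.floordiv n 16).toNat 16 ++
       ((PySem.List.pyGet? pvTail (PySem.Int.mod n 16)).getD [])

-- ===== PRECONDITION & SPEC =====
def Spec_split_dur16_pretty (dur16 : Int) (out : List Int) : Prop := out = split_dur16_pretty_alt dur16
instance (dur16 : Int) (out : List Int) : Decidable (Spec_split_dur16_pretty dur16 out) := by unfold Spec_split_dur16_pretty; infer_instance

-- ===== CLAIM (what is proved, stated in full; the proofs are below) =====
def Claim_equal_split_dur16_pretty : Prop := ∀ (dur16 : Int), Dom_split_dur16_pretty dur16 → Spec_split_dur16_pretty dur16 (split_dur16_pretty dur16)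

-- ===== LEMMAS AND PROOFS =====

lemma alt_step (n : Int) (h : 16 ≤ n) :
    split_dur16_pretty_alt n = 16 :: split_dur16_pretty_alt (n - 16) := by
  have h1 : ¬ n ≤ 0 := by omega
  rw [split_dur16_pretty_alt, split_dur16_pretty_alt]
  rw [PySem.Int.floordiv_eq_ediv_of_pos (by norm_num), PySem.Int.floordiv_eq_ediv_of_pos (by norm_num),
      PySem.Int.mod_eq_emod_of_pos (by norm_num), PySem.Int.mod_eq_emod_of_pos (by norm_num)]
  have hm : n % 16 = (n - 16) % 16 := by omega
  by_cases h2 : n - 16 ≤ 0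
  · have hn : n = 16 := by omega
    subst hn; simp [pvTail]
  · have hdiv : (n / 16).toNat = ((n - 16) / 16).toNat + 1 := by omega
    simp only [h1, h2, if_false, hdiv, hm, List.replicate_succ]
    simp

lemma loop_eq : ∀ (k : Nat) (n : Int) (out : List Int), n.toNat ≤ k →
    pvLoopA n out = out ++ split_dur16_pretty_alt n := by
  intro k
  induction k with
  | zero =>
    intro n out hk
    rw [pvLoopA]; simp [show ¬ n > 0 by omega, split_dur16_pretty_alt, show n ≤ 0 by omega]
  | succ k ih =>
    intro n out hk
    by_cases h0 : n ≤ 0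
    · rw [pvLoopA]; simp [show ¬ n > 0 by omega, split_dur16_pretty_alt, h0]
    · rw [pvLoopA]
      simp only [show n > 0 by omega, dite_true]
      split
      · rename_i p hfind
        by_cases h16 : 16 ≤ n
        · have hf16 : pvPreferredDur16.find? (fun p => decide (p ≤ n)) = some 16 := by
            simp [pvPreferredDur16, decide_eq_true h16]
          rw [hf16] at hfind
          injection hfind with hp; subst hp
          rw [ih _ _ (by omega), alt_step n h16]
          simp
        · interval_cases n <;>
            · simp [pvPreferredDur16, List.find?] at hfind
              subst hfind
              rw [ih _ _ (by omega)]
              simp only [List.append_assoc]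
              congr 1
      · rename_i hfind
        rw [List.find?_eq_none] at hfind
        have h1 := hfind 1 (by decide)
        simp at h1; omega

-- ===== VERDICT (by name: the statement is the Claim_ definition above) =====
theorem split_dur16_pretty_spec : Claim_equal_split_dur16_pretty := by
  intro n _
  unfold Spec_split_dur16_pretty split_dur16_pretty
  by_cases h : n ≤ 0
  · simp [h, split_dur16_pretty_alt]
  · simp only [h, if_false]
    simpa using loop_eq n.toNat n [] le_rfl
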